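-- pv_equiv track=rewrite | github.com/samuellozanoiglesias/LearnLikeMe | figures_generators/paper_figure_error_type.py | calculate_digit_frequencies
-- ===== SOURCE A (Python) =====
-- def calculate_digit_frequencies(test_pairs, number_size):
--     """Calculate how many times each digit (0-9) appears in the test set."""
--     digit_counts = {i: 0 for i in range(10)}
--
--     for pair in test_pairs:
--         num1, num2 = pair[0], pair[1]  # Unpack from (num1, num2, result) tuple
--         # Extract digits from num1
--         num1_str = str(num1).zfill(number_size)
--         for digit_char in num1_str:
--             digit_counts[int(digit_char)] += 1
--
--         # Extract digits from num2
--         num2_str = str(num2).zfill(number_size)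
--         for digit_char in num2_str:
--             digit_counts[int(digit_char)] += 1
--
--     return digit_counts
-- ===== SOURCE B (Python) =====
-- def calculate_digit_frequencies(test_pairs, number_size):
--     """Calculate how many times each digit (0-9) appears in the test set."""
--     counts = [0] * 10
--     for num1, num2, _ in test_pairs:
--         for n in (num1, num2):
--             # extract decimal digits arithmetically (no string conversion)
--             if n == 0:
--                 counts[0] += 1
--                 ndig = 1
--             else:
--                 ndig = 0
--                 while n > 0:
--                     counts[n % 10] += 1
--                     n //= 10
--                     ndig += 1
--             # zero-padding to number_size contributes extra '0' digits
--             if number_size > ndig: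
--                 counts[0] += number_size - ndig
--     return {i: counts[i] for i in range(10)}
-- ===== Notes on version B (the rewrite author's own statement) =====
-- stated objective: faster
-- what changed: B extracts each operand's decimal digits arithmetically with a divmod-by-10 while loop into a fixed 10-slot tally array and accounts for zfill padding with a single O(1) arithmetic bump of the zero slot, instead of A's conversion of every operand to a zero-padded string and per-character dict increments.
import Mathlib
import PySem

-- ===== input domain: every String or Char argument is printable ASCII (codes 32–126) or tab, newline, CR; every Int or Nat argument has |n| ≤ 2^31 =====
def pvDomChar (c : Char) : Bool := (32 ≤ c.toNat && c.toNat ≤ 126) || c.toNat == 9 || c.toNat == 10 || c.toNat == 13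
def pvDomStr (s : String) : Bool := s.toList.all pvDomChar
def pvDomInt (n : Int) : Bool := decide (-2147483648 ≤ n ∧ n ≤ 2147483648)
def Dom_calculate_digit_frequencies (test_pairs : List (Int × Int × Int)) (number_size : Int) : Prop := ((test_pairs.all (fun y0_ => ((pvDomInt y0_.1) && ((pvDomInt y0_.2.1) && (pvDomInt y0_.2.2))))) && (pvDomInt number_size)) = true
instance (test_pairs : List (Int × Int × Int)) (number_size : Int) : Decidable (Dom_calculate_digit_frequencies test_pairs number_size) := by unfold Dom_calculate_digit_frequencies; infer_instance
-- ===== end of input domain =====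

-- B tallies digits arithmetically (divmod-by-10 loop into a 10-slot array, padding added
-- as one arithmetic bump of slot 0) instead of A's string conversion + per-character dict
-- increments; an alternative algorithm of similar cost.


-- ===== PORT A =====
-- int(digit_char) for one character: exact on digit characters '0'-'9', the only characters
-- reached inside Pre_ (on a sign character Python raises ValueError, excluded by Pre_).
def pvCharInt (c : Char) : Int := (c.toNat : Int) - 48

def calculate_digit_frequencies (test_pairs : List (Int × Int × Int)) (number_size : Int) : List (Int × Int) :=
  -- digit_counts = {i: 0 for i in range(10)}
  let digit_counts : PySem.Dict Int Int :=
    (PySem.List.pyRange 0 10 1).foldl (fun d i => d.insert i 0) PySem.Dict.empty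
  -- for pair in test_pairs: two inner loops over the zfilled strings; digit_counts[int(c)] += 1
  -- (inside Pre_ every key int(c) is already present, so modify = the Python in-place increment)
  let final := test_pairs.foldl (fun d pair =>
    let num1_str := PySem.Chars.zfill (PySem.Int.toChars pair.1) number_size
    let d1 := num1_str.foldl (fun d c => d.modify (pvCharInt c) 0 (· + 1)) d
    let num2_str := PySem.Chars.zfill (PySem.Int.toChars pair.2.1) number_size
    num2_str.foldl (fun d c => d.modify (pvCharInt c) 0 (· + 1)) d1) digit_counts
  final.items

-- ===== PORT B =====
-- while n > 0: counts[n % 10] += 1; n //= 10; ndig += 1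
-- (counts[n % 10] is always in range 0..9, so getD/set are exact for Python's list indexing)
def pvWhileDigits (n : Int) (counts : List Int) (ndig : Int) : List Int × Int :=
  if h : 0 < n then
    let d := (PySem.Int.mod n 10).toNat
    pvWhileDigits (PySem.Int.floordiv n 10) (counts.set d (counts.getD d 0 + 1)) (ndig + 1)
  else (counts, ndig)
termination_by n.toNat
decreasing_by
  simp only [PySem.Int.floordiv, Int.fdiv_eq_ediv]
  omega

-- body of "for n in (num1, num2)": digit extraction plus the padding bump of counts[0]
-- if number_size > ndig: counts[0] += number_size - ndig  (the padding bump)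
def pvPadBump (number_size : Int) (r : List Int × Int) : List Int :=
  if number_size > r.2 then r.1.set 0 (r.1.getD 0 0 + (number_size - r.2)) else r.1

def pvCountOperand (number_size : Int) (counts : List Int) (n : Int) : List Int :=
  pvPadBump number_size
    (if n = 0 then (counts.set 0 (counts.getD 0 0 + 1), (1 : Int)) else pvWhileDigits n counts 0)

def calculate_digit_frequencies_alt (test_pairs : List (Int × Int × Int)) (number_size : Int) : List (Int × Int) :=
  -- counts = [0] * 10; for num1, num2, _ in test_pairs: for n in (num1, num2): …
  let counts := test_pairs.foldl
    (fun cs p => pvCountOperand number_size (pvCountOperand number_size cs p.1) p.2.1)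
    (List.replicate 10 0)
  -- {i: counts[i] for i in range(10)}
  (PySem.List.pyRange 0 10 1).map (fun i => (i, counts.getD i.toNat 0))

-- ===== PRECONDITION & SPEC =====
-- Pre_ excludes pairs with a negative operand: there str(num).zfill produces a '-' character
-- and A raises ValueError at int('-').
def Pre_calculate_digit_frequencies (test_pairs : List (Int × Int × Int)) (number_size : Int) : Prop :=
  ∀ p ∈ test_pairs, 0 ≤ p.1 ∧ 0 ≤ p.2.1
instance (test_pairs : List (Int × Int × Int)) (number_size : Int) : Decidable (Pre_calculate_digit_frequencies test_pairs number_size) := by unfold Pre_calculate_digit_frequencies; infer_instance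
def pvWitness_calculate_digit_frequencies : (List (Int × Int × Int)) × Int := ([(12, 3, 15)], 2)

def Spec_calculate_digit_frequencies (test_pairs : List (Int × Int × Int)) (number_size : Int) (out : List (Int × Int)) : Prop := out = calculate_digit_frequencies_alt test_pairs number_size
instance (test_pairs : List (Int × Int × Int)) (number_size : Int) (out : List (Int × Int)) : Decidable (Spec_calculate_digit_frequencies test_pairs number_size out) := by unfold Spec_calculate_digit_frequencies; infer_instance

-- ===== CLAIM (what is proved, stated in full; the proofs are below) =====
def Claim_equal_calculate_digit_frequencies : Prop := ∀ (test_pairs : List (Int × Int × Int)) (number_size : Int), Dom_calculate_digit_frequencies test_pairs number_size → Pre_calculate_digit_frequencies test_pairs number_size → Spec_calculate_digit_frequencies test_pairs number_size (calculate_digit_frequencies test_pairs number_size)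

-- ===== LEMMAS AND PROOFS =====
def pvDigitChar (i : Int) : Char := Char.ofNat (48 + i.toNat)

def pvDigit (c : Char) : Prop := 48 ≤ c.toNat ∧ c.toNat ≤ 57

def pvTen (f : Int → Int) : List (Int × Int) :=
  [(0, f 0), (1, f 1), (2, f 2), (3, f 3), (4, f 4), (5, f 5), (6, f 6), (7, f 7), (8, f 8), (9, f 9)]

lemma pvTen_congr (f g : Int → Int) (h : ∀ i : Int, 0 ≤ i → i < 10 → f i = g i) : pvTen f = pvTen g := by
  simp only [pvTen]
  rw [h 0 (by norm_num) (by norm_num), h 1 (by norm_num) (by norm_num),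
      h 2 (by norm_num) (by norm_num), h 3 (by norm_num) (by norm_num),
      h 4 (by norm_num) (by norm_num), h 5 (by norm_num) (by norm_num),
      h 6 (by norm_num) (by norm_num), h 7 (by norm_num) (by norm_num),
      h 8 (by norm_num) (by norm_num), h 9 (by norm_num) (by norm_num)]

lemma pvDigitChar_toNat (i : Int) (h0 : 0 ≤ i) (h9 : i < 10) : (pvDigitChar i).toNat = 48 + i.toNat := by
  interval_cases i <;> decide

lemma pvCharInt_eq_iff (c : Char) (i : Int) (hc : pvDigit c) (h0 : 0 ≤ i) (h9 : i < 10) :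
    i = pvCharInt c ↔ c = pvDigitChar i := by
  obtain ⟨h48, h57⟩ := hc
  constructor
  · intro h
    have hn : 48 + i.toNat = c.toNat := by
      unfold pvCharInt at h; omega
    have : pvDigitChar i = Char.ofNat c.toNat := by unfold pvDigitChar; rw [hn]
    rw [this, Char.ofNat_toNat]
  · intro h
    have := pvDigitChar_toNat i h0 h9
    rw [h] at h48 h57 ⊢
    unfold pvCharInt
    omega

lemma pvBump_ten (f : Int → Int) (c : Char) (hc : pvDigit c) :
    (PySem.Dict.mk (pvTen f)).modify (pvCharInt c) 0 (· + 1) =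
      PySem.Dict.mk (pvTen (fun i => if i = pvCharInt c then f i + 1 else f i)) := by
  obtain ⟨h48, h57⟩ := hc
  have h0 : 0 ≤ pvCharInt c := by unfold pvCharInt; omega
  have h9 : pvCharInt c < 10 := by unfold pvCharInt; omega
  generalize hgen : pvCharInt c = k at h0 h9 ⊢
  interval_cases k <;>
    simp [pvTen, PySem.Dict.modify, PySem.Dict.insert, PySem.Dict.contains,
          PySem.Dict.getD, PySem.Dict.get?]

lemma pvLoop (L : List Char) (hL : ∀ c ∈ L, pvDigit c) (f : Int → Int) :
    L.foldl (fun d c => d.modify (pvCharInt c) 0 (· + 1)) (PySem.Dict.mk (pvTen f)) =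
      PySem.Dict.mk (pvTen (fun i => f i + (L.count (pvDigitChar i) : Int))) := by
  induction L generalizing f with
  | nil =>
    simp only [List.foldl_nil, List.count_nil, Nat.cast_zero, add_zero]
  | cons c L ih =>
    have hc : pvDigit c := hL c (List.mem_cons_self)
    simp only [List.foldl_cons]
    rw [pvBump_ten f c hc, ih (fun x hx => hL x (List.mem_cons_of_mem _ hx))]
    refine congrArg PySem.Dict.mk (pvTen_congr _ _ ?_)
    intro i hi0 hi9
    rw [List.count_cons]
    by_cases h : i = pvCharInt c
    · have hcc : c = pvDigitChar i := (pvCharInt_eq_iff c i hc hi0 hi9).1 h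
      rw [if_pos h, if_pos (by simp [hcc])]
      push_cast; ring
    · have hcc : ¬ c = pvDigitChar i := fun hh => h ((pvCharInt_eq_iff c i hc hi0 hi9).2 hh)
      rw [if_neg h, if_neg (by simpa using hcc)]
      push_cast; ring

lemma pvDigitChar_nat_digit (m : Nat) (h : m < 10) : pvDigit (Nat.digitChar m) := by
  interval_cases m <;> exact ⟨by decide, by decide⟩

lemma pvToDigitsCore_digits : ∀ (fuel n : Nat) (ds : List Char) (c : Char),
    c ∈ Nat.toDigitsCore 10 fuel n ds → pvDigit c ∨ c ∈ ds := by
  intro fuel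
  induction fuel with
  | zero => intro n ds c h; right; simpa [Nat.toDigitsCore] using h
  | succ fuel ih =>
    intro n ds c h
    rw [Nat.toDigitsCore] at h
    split at h
    · rcases List.mem_cons.1 h with h | h
      · exact Or.inl (h ▸ pvDigitChar_nat_digit _ (Nat.mod_lt _ (by norm_num)))
      · exact Or.inr h
    · rcases ih _ _ _ h with h | h
      · exact Or.inl h
      · rcases List.mem_cons.1 h with h | h
        · exact Or.inl (h ▸ pvDigitChar_nat_digit _ (Nat.mod_lt _ (by norm_num)))
        · exact Or.inr h

lemma pvToChars_digits (n : Int) (hn : 0 ≤ n) (c : Char) (h : c ∈ PySem.Int.toChars n) : pvDigit c := by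
  unfold PySem.Int.toChars at h
  rw [if_neg (by omega)] at h
  rcases pvToDigitsCore_digits _ _ _ _ h with h | h
  · exact h
  · simp at h

lemma pvZfill_digits (cs : List Char) (w : Int) (hcs : ∀ c ∈ cs, pvDigit c) :
    ∀ c ∈ PySem.Chars.zfill cs w, pvDigit c := by
  intro c h
  unfold PySem.Chars.zfill at h
  split at h
  · exact hcs c h
  · split at h
    · split at h
      · rcases List.mem_cons.1 h with h | h
        · exact hcs _ (h ▸ List.mem_cons_self)
        · rcases List.mem_append.1 h with h | h
          · rw [List.eq_of_mem_replicate h]; exact ⟨by decide, by decide⟩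
          · exact hcs _ (List.mem_cons_of_mem _ h)
      · rcases List.mem_append.1 h with h | h
        · rw [List.eq_of_mem_replicate h]; exact ⟨by decide, by decide⟩
        · exact hcs c h
    · rw [List.eq_of_mem_replicate h]; exact ⟨by decide, by decide⟩

-- the per-pair digit string, shared by the rewrites of both ports
def pvPairChars (number_size : Int) (p : Int × Int × Int) : List Char :=
  PySem.Chars.zfill (PySem.Int.toChars p.1) number_size ++
  PySem.Chars.zfill (PySem.Int.toChars p.2.1) number_size

lemma pvA_eq (test_pairs : List (Int × Int × Int)) (number_size : Int)
    (hpre : Pre_calculate_digit_frequencies test_pairs number_size) :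
    calculate_digit_frequencies test_pairs number_size =
      pvTen (fun i => 0 + ((test_pairs.flatMap (pvPairChars number_size)).count (pvDigitChar i) : Int)) := by
  simp only [calculate_digit_frequencies]
  have hinit : (PySem.List.pyRange 0 10 1).foldl (fun d i => d.insert i 0) PySem.Dict.empty =
      PySem.Dict.mk (pvTen (fun _ => 0)) := by decide
  rw [hinit]
  have hfold : test_pairs.foldl (fun d pair =>
      let num1_str := PySem.Chars.zfill (PySem.Int.toChars pair.1) number_size
      let d1 := num1_str.foldl (fun d c => d.modify (pvCharInt c) 0 (· + 1)) d
      let num2_str := PySem.Chars.zfill (PySem.Int.toChars pair.2.1) number_size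
      num2_str.foldl (fun d c => d.modify (pvCharInt c) 0 (· + 1)) d1)
        (PySem.Dict.mk (pvTen (fun _ => 0))) =
      (test_pairs.flatMap (pvPairChars number_size)).foldl
        (fun d c => d.modify (pvCharInt c) 0 (· + 1)) (PySem.Dict.mk (pvTen (fun _ => 0))) := by
    rw [List.foldl_flatMap]
    congr 1
    funext d p
    simp [pvPairChars, List.foldl_append]
  rw [hfold, pvLoop]
  intro c hc
  rcases List.mem_flatMap.1 hc with ⟨p, hp, hcp⟩
  rcases List.mem_append.1 hcp with h | h
  · exact pvZfill_digits _ _ (fun x hx => pvToChars_digits _ (hpre p hp).1 x hx) c h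
  · exact pvZfill_digits _ _ (fun x hx => pvToChars_digits _ (hpre p hp).2 x hx) c h

-- ===== B-side lemmas =====
def pvTenList (f : Int → Int) : List Int :=
  [f 0, f 1, f 2, f 3, f 4, f 5, f 6, f 7, f 8, f 9]

lemma pvTenList_congr (f g : Int → Int) (h : ∀ i : Int, 0 ≤ i → i < 10 → f i = g i) :
    pvTenList f = pvTenList g := by
  simp only [pvTenList]
  rw [h 0 (by norm_num) (by norm_num), h 1 (by norm_num) (by norm_num),
      h 2 (by norm_num) (by norm_num), h 3 (by norm_num) (by norm_num),
      h 4 (by norm_num) (by norm_num), h 5 (by norm_num) (by norm_num),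
      h 6 (by norm_num) (by norm_num), h 7 (by norm_num) (by norm_num),
      h 8 (by norm_num) (by norm_num), h 9 (by norm_num) (by norm_num)]

lemma pvTenList_set (f : Int → Int) (d : Nat) (hd : d < 10) (x : Int) :
    (pvTenList f).set d ((pvTenList f).getD d 0 + x) =
      pvTenList (fun i => if i = (d : Int) then f i + x else f i) := by
  interval_cases d <;> simp [pvTenList]

-- digits of m as Python sees them: one '0' for m = 0, else the little-endian digits
def pvDigs (m : Nat) : List Nat := if m = 0 then [0] else Nat.digits 10 m

lemma pvWhile_eq : ∀ (m : Nat) (f : Int → Int) (k : Int),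
    pvWhileDigits (m : Int) (pvTenList f) k =
      (pvTenList (fun i => f i + ((Nat.digits 10 m).count i.toNat : Int)),
       k + ((Nat.digits 10 m).length : Int)) := by
  intro m
  induction m using Nat.strong_induction_on with
  | _ m ih =>
    intro f k
    rw [pvWhileDigits]
    by_cases hm : m = 0
    · subst hm
      rw [dif_neg (by omega)]
      simp [pvTenList]
    · rw [dif_pos (by omega)]
      have hmod : PySem.Int.mod (m : Int) 10 = ((m % 10 : Nat) : Int) := by
        simp [PySem.Int.mod, Int.fmod_eq_emod]
      have hdiv : PySem.Int.floordiv (m : Int) 10 = ((m / 10 : Nat) : Int) := by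
        simp [PySem.Int.floordiv, Int.fdiv_eq_ediv]
      have hd10 : m % 10 < 10 := Nat.mod_lt _ (by norm_num)
      have htn : (PySem.Int.mod (m : Int) 10).toNat = m % 10 := by rw [hmod]; omega
      rw [hdiv]
      simp only [htn]
      rw [pvTenList_set f (m % 10) hd10 1,
          ih (m / 10) (Nat.div_lt_self (by omega) (by norm_num)) _ (k + 1)]
      have hdigs : Nat.digits 10 m = m % 10 :: Nat.digits 10 (m / 10) :=
        Nat.digits_def' (by norm_num) (by omega)
      simp only [Prod.mk.injEq]
      constructor
      · apply pvTenList_congr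
        intro i h0 h9
        rw [hdigs]
        simp only [List.count_cons, beq_iff_eq]
        by_cases hi : i = ((m % 10 : Nat) : Int)
        · rw [if_pos hi, if_pos (by omega : m % 10 = i.toNat)]
          push_cast; ring
        · rw [if_neg hi, if_neg (by omega : ¬ m % 10 = i.toNat)]
          push_cast; ring
      · rw [hdigs]
        push_cast [List.length_cons]
        ring

lemma pvToDigitsCore_eq : ∀ (fuel n : Nat) (ds : List Char), 0 < n → n ≤ fuel →
    Nat.toDigitsCore 10 fuel n ds = (Nat.digits 10 n).reverse.map Nat.digitChar ++ ds := by
  intro fuel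
  induction fuel with
  | zero => intro n ds h1 h2; omega
  | succ fuel ih =>
    intro n ds h1 h2
    rw [Nat.toDigitsCore]
    have hdigs : Nat.digits 10 n = n % 10 :: Nat.digits 10 (n / 10) :=
      Nat.digits_def' (by norm_num) h1
    by_cases hq : n / 10 = 0
    · rw [if_pos hq, hdigs, hq]
      simp
    · rw [if_neg hq,
          ih (n / 10) _ (by omega) (by have := Nat.div_lt_self h1 (by norm_num : (1:Nat) < 10); omega),
          hdigs]
      simp

lemma pvToChars_eq (m : Nat) :
    PySem.Int.toChars (m : Int) = (pvDigs m).reverse.map Nat.digitChar := by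
  by_cases hm : m = 0
  · subst hm; decide
  · unfold PySem.Int.toChars
    rw [if_neg (by omega)]
    have : (m : Int).toNat = m := by omega
    rw [this]
    unfold Nat.toDigits
    rw [pvToDigitsCore_eq (m + 1) m [] (by omega) (by omega), pvDigs, if_neg hm]
    simp

lemma pvDigitChar_eq_digitChar (i : Int) (x : Nat) (h0 : 0 ≤ i) (h9 : i < 10) (hx : x < 10) :
    (Nat.digitChar x = pvDigitChar i) ↔ (x = i.toNat) := by
  interval_cases i <;> interval_cases x <;> simp [pvDigitChar] <;> decide

lemma pvCount_map (l : List Nat) (hl : ∀ x ∈ l, x < 10) (i : Int) (h0 : 0 ≤ i) (h9 : i < 10) :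
    (l.map Nat.digitChar).count (pvDigitChar i) = l.count i.toNat := by
  induction l with
  | nil => simp
  | cons x l ihl =>
    have hx : x < 10 := hl x (List.mem_cons_self)
    simp only [List.map_cons, List.count_cons, beq_iff_eq]
    rw [ihl (fun y hy => hl y (List.mem_cons_of_mem _ hy))]
    by_cases h : x = i.toNat
    · rw [if_pos ((pvDigitChar_eq_digitChar i x h0 h9 hx).2 h), if_pos h]
    · rw [if_neg (fun hc => h ((pvDigitChar_eq_digitChar i x h0 h9 hx).1 hc)), if_neg h]

lemma pvDigs_lt (m : Nat) : ∀ x ∈ pvDigs m, x < 10 := by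
  intro x hx
  unfold pvDigs at hx
  split at hx
  · simp at hx; omega
  · exact Nat.digits_lt_base (by norm_num) hx

lemma pvDigs_ne_nil (m : Nat) : pvDigs m ≠ [] := by
  unfold pvDigs
  split
  · simp
  · exact Nat.digits_ne_nil_iff_ne_zero.2 (by assumption)

lemma pvZfill_count (c : Char) (rest : List Char) (w : Int) (c0 : Char)
    (hhead : ¬ (c = '+' ∨ c = '-')) :
    (PySem.Chars.zfill (c :: rest) w).count c0 =
      (if c0 = '0' then w.toNat - (c :: rest).length else 0) + (c :: rest).count c0 := by
  simp only [PySem.Chars.zfill]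
  split
  · have h0 : w.toNat - (c :: rest).length = 0 := by rename_i hw; omega
    rw [h0]
    simp
  · rw [List.count_append]
    by_cases h0 : c0 = '0'
    · simp [h0, List.count_replicate]
    · simp [h0, List.count_replicate]
      intro hc
      exact absurd hc.symm h0

lemma pvDigitChar_eq_zero_iff (i : Int) (h0 : 0 ≤ i) (h9 : i < 10) :
    pvDigitChar i = '0' ↔ i = 0 := by
  interval_cases i <;> simp [pvDigitChar]

-- padding contribution (as an Int), len = number of digit characters of the operand
def pvPad (ns : Int) (len : Nat) : Int := if (len : Int) < ns then ns - len else 0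

lemma pvZfillChars_count (m : Nat) (ns : Int) (i : Int) (h0 : 0 ≤ i) (h9 : i < 10) :
    ((PySem.Chars.zfill (PySem.Int.toChars (m : Int)) ns).count (pvDigitChar i) : Int) =
      ((pvDigs m).count i.toNat : Int) + (if i = 0 then pvPad ns (pvDigs m).length else 0) := by
  rw [pvToChars_eq m]
  have hne : (pvDigs m).reverse.map Nat.digitChar ≠ [] := by
    simp [pvDigs_ne_nil m]
  obtain ⟨a, l, hal⟩ := List.exists_cons_of_ne_nil hne
  have ha : ∀ c', c' ∈ (pvDigs m).reverse.map Nat.digitChar → ¬ (c' = '+' ∨ c' = '-') := by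
    intro c' hmem
    rcases List.mem_map.1 hmem with ⟨x, hx, hxc⟩
    have hx10 : x < 10 := pvDigs_lt m x (List.mem_reverse.1 hx)
    subst hxc
    interval_cases x <;> decide
  rw [hal]
  rw [pvZfill_count a l ns _ (ha a (hal ▸ List.mem_cons_self)), ← hal]
  have hcnt : ((pvDigs m).reverse.map Nat.digitChar).count (pvDigitChar i) =
      (pvDigs m).count i.toNat := by
    rw [pvCount_map _ (fun x hx => pvDigs_lt m x (List.mem_reverse.1 hx)) i h0 h9,
        List.count_reverse]
  rw [hcnt]
  have hlen : ((pvDigs m).reverse.map Nat.digitChar).length = (pvDigs m).length := by simp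
  rw [hlen]
  by_cases hi : i = 0
  · rw [if_pos ((pvDigitChar_eq_zero_iff i h0 h9).2 hi), if_pos hi]
    unfold pvPad
    push_cast
    split_ifs <;> omega
  · rw [if_neg (fun h => hi ((pvDigitChar_eq_zero_iff i h0 h9).1 h)), if_neg hi]
    push_cast; ring

lemma pvPadBump_pair (ns : Int) (cs : List Int) (k : Int) :
    pvPadBump ns (cs, k) = if ns > k then cs.set 0 (cs.getD 0 0 + (ns - k)) else cs := rfl

lemma pvPadBump_eq (ns k : Int) (h : Int → Int) :
    pvPadBump ns (pvTenList h, k) =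
      pvTenList (fun i => h i + if i = 0 then (if k < ns then ns - k else 0) else 0) := by
  rw [pvPadBump_pair]
  by_cases hp : ns > k
  · rw [if_pos hp, pvTenList_set h 0 (by norm_num) (ns - k)]
    apply pvTenList_congr
    intro i h0 h9
    split_ifs <;> omega
  · rw [if_neg hp]
    apply pvTenList_congr
    intro i h0 h9
    split_ifs <;> omega

lemma pvOperand_eq (ns : Int) (f : Int → Int) (n : Int) (hn : 0 ≤ n) :
    pvCountOperand ns (pvTenList f) n =
      pvTenList (fun i =>
        f i + ((PySem.Chars.zfill (PySem.Int.toChars n) ns).count (pvDigitChar i) : Int)) := by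
  obtain ⟨m, rfl⟩ : ∃ m : Nat, n = (m : Int) := ⟨n.toNat, by omega⟩
  unfold pvCountOperand
  by_cases hm : m = 0
  · subst hm
    rw [if_pos (by norm_num), pvTenList_set f 0 (by norm_num) 1, pvPadBump_eq]
    apply pvTenList_congr
    intro i h0 h9
    rw [pvZfillChars_count 0 ns i h0 h9]
    have hd : pvDigs 0 = [0] := rfl
    rw [hd]
    have hcnt : ([0] : List Nat).count i.toNat = if i.toNat = 0 then 1 else 0 := by
      by_cases hj : i.toNat = 0
      · simp [hj, List.count_cons]
      · simp [hj, List.count_cons]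
        omega
    have hlen : ([0] : List Nat).length = 1 := rfl
    rw [hcnt, hlen]
    unfold pvPad
    push_cast
    split_ifs <;> omega
  · rw [if_neg (by omega), pvWhile_eq m f 0, pvPadBump_eq]
    apply pvTenList_congr
    intro i h0 h9
    rw [pvZfillChars_count m ns i h0 h9]
    have hdigs : pvDigs m = Nat.digits 10 m := by unfold pvDigs; rw [if_neg hm]
    rw [hdigs]
    unfold pvPad
    split_ifs <;> omega

lemma pvB_fold (test_pairs : List (Int × Int × Int)) (ns : Int)
    (hpre : ∀ p ∈ test_pairs, 0 ≤ p.1 ∧ 0 ≤ p.2.1) (f : Int → Int) :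
    test_pairs.foldl (fun cs p => pvCountOperand ns (pvCountOperand ns cs p.1) p.2.1)
        (pvTenList f) =
      pvTenList (fun i => f i + ((test_pairs.flatMap (pvPairChars ns)).count (pvDigitChar i) : Int)) := by
  induction test_pairs generalizing f with
  | nil => simp [pvTenList]
  | cons p ps ih =>
    have hp := hpre p (List.mem_cons_self)
    simp only [List.foldl_cons]
    rw [pvOperand_eq ns f p.1 hp.1, pvOperand_eq ns _ p.2.1 hp.2,
        ih (fun q hq => hpre q (List.mem_cons_of_mem _ hq))]
    apply pvTenList_congr
    intro i h0 h9
    simp only [List.flatMap_cons, List.count_append, pvPairChars]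
    push_cast; ring

lemma pvB_eq (test_pairs : List (Int × Int × Int)) (number_size : Int)
    (hpre : Pre_calculate_digit_frequencies test_pairs number_size) :
    calculate_digit_frequencies_alt test_pairs number_size =
      pvTen (fun i => ((test_pairs.flatMap (pvPairChars number_size)).count (pvDigitChar i) : Int)) := by
  unfold calculate_digit_frequencies_alt
  have hrep : List.replicate 10 (0 : Int) = pvTenList (fun _ => 0) := by rfl
  rw [hrep, pvB_fold test_pairs number_size hpre (fun _ => 0)]
  have hr : PySem.List.pyRange 0 10 1 = [0, 1, 2, 3, 4, 5, 6, 7, 8, 9] := by decide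
  rw [hr]
  simp [pvTen, pvTenList]

-- ===== VERDICT (by name: the statement is the Claim_ definition above) =====
theorem calculate_digit_frequencies_spec : Claim_equal_calculate_digit_frequencies := by
  intro test_pairs number_size _ hpre
  unfold Spec_calculate_digit_frequencies
  rw [pvA_eq test_pairs number_size hpre, pvB_eq test_pairs number_size hpre]
  exact pvTen_congr _ _ (fun i _ _ => by ring)
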